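-- pv_equiv track=rewrite | github.com/Bread-Technologies/baked_thinking | scripts/test_prompt.py | highlight_confidence_token
-- ===== SOURCE A (Python) =====
-- def highlight_confidence_token(text: str) -> str:
--     """Highlight confidence tokens in the response."""
--     # ANSI colors
--     GREEN = "\033[92m"
--     YELLOW = "\033[93m"
--     RESET = "\033[0m"
--     BOLD = "\033[1m"
--     CYAN = "\033[96m"
--
--     text = text.replace("<confident>", f"{BOLD}{GREEN}<confident>{RESET}")
--     text = text.replace("<uncertain>", f"{BOLD}{YELLOW}<uncertain>{RESET}")
--
--     # Highlight <think> blocks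
--     if "<think>" in text and "</think>" in text:
--         parts = text.split("<think>")
--         formatted_parts = [parts[0]]
--         for part in parts[1:]:
--             if "</think>" in part:
--                 think_content, rest = part.split("</think>", 1)
--                 formatted_parts.append(f"{CYAN}<think>{think_content}</think>{RESET}{rest}")
--             else:
--                 formatted_parts.append(f"<think>{part}")
--         text = "".join(formatted_parts)
--
--     return text
-- ===== SOURCE B (Python) =====
-- def highlight_confidence_token(text: str) -> str:
--     """Highlight confidence tokens in the response (single forward scan)."""
--     # ANSI colors
--     GREEN = "\033[92m"
--     YELLOW = "\033[93m"
--     RESET = "\033[0m"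
--     BOLD = "\033[1m"
--     CYAN = "\033[96m"
--
--     text = text.replace("<confident>", f"{BOLD}{GREEN}<confident>{RESET}")
--     text = text.replace("<uncertain>", f"{BOLD}{YELLOW}<uncertain>{RESET}")
--
--     OPEN, CLOSE = "<think>", "</think>"
--     out = []
--     i, n = 0, len(text)
--     while i < n:
--         if text.startswith(OPEN, i):
--             # scan for a closing tag with no intervening open tag
--             j = i + len(OPEN)
--             while j < n and not text.startswith(OPEN, j) and not text.startswith(CLOSE, j):
--                 j += 1
--             if j < n and text.startswith(CLOSE, j):
--                 out.append(f"{CYAN}{OPEN}{text[i + len(OPEN):j]}{CLOSE}{RESET}")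
--                 i = j + len(CLOSE)
--             else:
--                 out.append(OPEN)
--                 i += len(OPEN)
--         else:
--             out.append(text[i])
--             i += 1
--     return "".join(out)
-- ===== Notes on version B (the rewrite author's own statement) =====
-- stated objective: alternative
-- what changed: A's guard + split('<think>') + per-part split('</think>',1) + list-join pipeline for <think> blocks is replaced by a single left-to-right scan that copies characters and wraps a block only when a closing tag is found before any intervening open tag; the two literal .replace calls are kept.
import Mathlib
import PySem

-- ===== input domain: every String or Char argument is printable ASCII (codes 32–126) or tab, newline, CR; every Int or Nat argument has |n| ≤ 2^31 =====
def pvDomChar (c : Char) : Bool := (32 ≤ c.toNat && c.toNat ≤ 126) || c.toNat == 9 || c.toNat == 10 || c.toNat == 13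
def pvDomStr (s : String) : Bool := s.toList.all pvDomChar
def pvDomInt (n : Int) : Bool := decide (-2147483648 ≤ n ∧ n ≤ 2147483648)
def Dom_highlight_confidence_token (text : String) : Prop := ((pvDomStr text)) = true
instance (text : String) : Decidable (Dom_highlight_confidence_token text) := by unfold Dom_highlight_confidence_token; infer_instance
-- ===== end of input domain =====

-- B replaces A's guard + split("<think>") + per-part split("</think>",1) + join pipeline by a single
-- left-to-right scan that copies characters and wraps a <think>…</think> block when the closing tag
-- has no intervening open tag (objective: alternative single-pass structure).

-- ===== PORT A =====
def highlight_confidence_token (text : String) : String :=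
  let GREEN := "\x1b[92m"
  let YELLOW := "\x1b[93m"
  let RESET := "\x1b[0m"
  let BOLD := "\x1b[1m"
  let CYAN := "\x1b[96m"
  let t1 := PySem.Str.replace text "<confident>" (BOLD ++ GREEN ++ "<confident>" ++ RESET)
  let t2 := PySem.Str.replace t1 "<uncertain>" (BOLD ++ YELLOW ++ "<uncertain>" ++ RESET)
  if PySem.Str.isIn "<think>" t2 && PySem.Str.isIn "</think>" t2 then
    match PySem.Str.split? t2 "<think>" with
    | some (p0 :: rest) =>
        let formatted := p0 :: rest.map (fun part =>
          if PySem.Str.isIn "</think>" part then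
            match PySem.Str.splitMax? part "</think>" 1 with
            | some (tc :: r :: _) => CYAN ++ "<think>" ++ tc ++ "</think>" ++ RESET ++ r
            | _ => part   -- unreachable: split(sep, 1) with sep present yields exactly two pieces
          else "<think>" ++ part)
        PySem.Str.join "" formatted
    | _ => t2             -- unreachable: split? with a nonempty separator is some and nonempty
  else t2

-- ===== PORT B =====
-- inner while-loop of Source B: scan forward for "</think>" stopping at any "<think>";
-- some (content, rest-after-close) when a close tag is reached first, none otherwise
def hctInner (cs : List Char) : Option (List Char × List Char) :=
  match cs with
  | [] => none
  | c :: rest =>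
    if List.isPrefixOf "<think>".toList (c :: rest) then none
    else if List.isPrefixOf "</think>".toList (c :: rest) then some ([], (c :: rest).drop 8)
    else
      match hctInner rest with
      | none => none
      | some (buf, rem) => some (c :: buf, rem)

theorem hctInner_rem_le (cs : List Char) (buf rem : List Char)
    (h : hctInner cs = some (buf, rem)) : rem.length ≤ cs.length := by
  induction cs generalizing buf rem with
  | nil => simp [hctInner] at h
  | cons c rest ih =>
    unfold hctInner at h
    split at h
    · exact absurd h (by simp)
    · split at h
      · simp at h
        obtain ⟨_, h2⟩ := h
        subst h2
        simp
        omega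
      · revert h
        split <;> intro h
        · exact absurd h (by simp)
        · next buf' rem' heq =>
          simp at h
          obtain ⟨_, h2⟩ := h
          subst h2
          exact le_trans (ih _ _ heq) (by simp)

-- outer while-loop of Source B
def hctScan (cs : List Char) : List Char :=
  match cs with
  | [] => []
  | c :: rest =>
    if List.isPrefixOf "<think>".toList (c :: rest) then
      match h : hctInner ((c :: rest).drop 7) with
      | some (buf, rem) =>
          "\x1b[96m".toList ++ "<think>".toList ++ buf ++ "</think>".toList ++ "\x1b[0m".toList ++
            hctScan rem
      | none => "<think>".toList ++ hctScan ((c :: rest).drop 7)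
    else c :: hctScan rest
termination_by cs.length
decreasing_by
  · have h1 := hctInner_rem_le _ _ _ h
    simp at h1 ⊢
    omega
  · simp
  · simp

def highlight_confidence_token_alt (text : String) : String :=
  let GREEN := "\x1b[92m"
  let YELLOW := "\x1b[93m"
  let RESET := "\x1b[0m"
  let BOLD := "\x1b[1m"
  let CYAN := "\x1b[96m"
  let t1 := PySem.Str.replace text "<confident>" (BOLD ++ GREEN ++ "<confident>" ++ RESET)
  let t2 := PySem.Str.replace t1 "<uncertain>" (BOLD ++ YELLOW ++ "<uncertain>" ++ RESET)
  String.ofList (hctScan t2.toList)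

-- ===== PRECONDITION & SPEC =====
def Spec_highlight_confidence_token (text : String) (out : String) : Prop := out = highlight_confidence_token_alt text
instance (text : String) (out : String) : Decidable (Spec_highlight_confidence_token text out) := by unfold Spec_highlight_confidence_token; infer_instance

-- ===== CLAIM (what is proved, stated in full; the proofs are below) =====
def Claim_equal_highlight_confidence_token : Prop := ∀ (text : String), Dom_highlight_confidence_token text → Spec_highlight_confidence_token text (highlight_confidence_token text)

-- ===== LEMMAS AND PROOFS =====

-- list-level abbreviations for the tag and colour constants
def oT : List Char := "<think>".toList
def eT : List Char := "</think>".toList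
def cyanT : List Char := "\x1b[96m".toList
def resetT : List Char := "\x1b[0m".toList

-- break a list at the FIRST occurrence of sep: some (before, after)
def brk (sep : List Char) : List Char → Option (List Char × List Char)
  | [] => none
  | c :: rest =>
    if sep.isPrefixOf (c :: rest) then some ([], (c :: rest).drop sep.length)
    else
      match brk sep rest with
      | none => none
      | some (a, b) => some (c :: a, b)

theorem prefix_split {p a x : List Char} (h : p <+: a ++ x) :
    p <+: a ∨ (a <+: p ∧ p.drop a.length <+: x) := by
  by_cases hl : p.length ≤ a.length
  · exact Or.inl ((List.isPrefix_append_of_length hl).mp h)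
  · right
    obtain ⟨t, ht⟩ := h
    have ha : a <+: p := by
      have h1 : a <+: p ++ t := ⟨x, ht.symm⟩
      exact (List.isPrefix_append_of_length (by omega)).mp h1
    obtain ⟨u, hu⟩ := ha
    refine ⟨⟨u, hu⟩, ?_⟩
    subst hu
    have hx : u ++ t = x := by
      have := ht
      rw [List.append_assoc] at this
      exact List.append_cancel_left this
    exact ⟨t, by simpa using hx⟩

theorem brk_decomp {sep l a b : List Char} (h : brk sep l = some (a, b)) :
    l = a ++ sep ++ b := by
  induction l generalizing a b with
  | nil => simp [brk] at h
  | cons c rest ih =>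
    unfold brk at h
    split at h
    · next hpre =>
      simp at h
      obtain ⟨rfl, rfl⟩ := h
      obtain ⟨t, ht⟩ := List.isPrefixOf_iff_prefix.mp hpre
      rw [← ht]
      simp [List.drop_left]
    · revert h
      split <;> intro h
      · exact absurd h (by simp)
      · next a' b' heq =>
        simp at h
        obtain ⟨rfl, rfl⟩ := h
        simpa using ih heq

theorem brk_none_iff {sep : List Char} (hs : sep ≠ []) (l : List Char) :
    brk sep l = none ↔ ¬ sep <:+: l := by
  induction l with
  | nil =>
    simp [brk]
    exact hs
  | cons c rest ih =>
    rw [List.infix_cons_iff]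
    unfold brk
    constructor
    · intro h
      split at h
      · exact absurd h (by simp)
      · next hpre =>
        revert h
        split <;> intro h
        · next heq =>
          rintro (hp | hi)
          · exact hpre (List.isPrefixOf_iff_prefix.mpr hp)
          · exact (ih.mp heq) hi
        · exact absurd h (by simp)
    · intro h
      push_neg at h
      obtain ⟨h1, h2⟩ := h
      rw [if_neg (fun hp => h1 (List.isPrefixOf_iff_prefix.mp hp))]
      rw [ih.mpr h2]

theorem brk_no_occ {sep l a b : List Char} (h : brk sep l = some (a, b)) :
    ∀ a₁ a₂, a = a₁ ++ a₂ → a₂ ≠ [] → ¬ sep <+: a₂ ++ sep ++ b := by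
  induction l generalizing a b with
  | nil => simp [brk] at h
  | cons c rest ih =>
    unfold brk at h
    split at h
    · next hpre =>
      simp at h
      obtain ⟨rfl, rfl⟩ := h
      intro a₁ a₂ hsplit hne
      exact absurd (List.append_eq_nil_iff.mp hsplit.symm).2 hne
    · next hpre =>
      revert h
      split <;> intro h
      · exact absurd h (by simp)
      · next a' b' heq =>
        simp at h
        obtain ⟨rfl, rfl⟩ := h
        intro a₁ a₂ hsplit hne
        cases a₁ with
        | nil =>
          simp at hsplit
          subst hsplit
          intro hp
          have hdec := brk_decomp heq
          rw [hdec] at hpre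
          exact hpre (List.isPrefixOf_iff_prefix.mpr (by simpa using hp))
        | cons d a₁' =>
          simp at hsplit
          obtain ⟨rfl, hsplit⟩ := hsplit
          exact ih heq a₁' a₂ hsplit hne

theorem brk_cons (sep : List Char) (c : Char) (rest : List Char) :
    brk sep (c :: rest) =
      if sep.isPrefixOf (c :: rest) then some ([], (c :: rest).drop sep.length)
      else
        match brk sep rest with
        | none => none
        | some (a, b) => some (c :: a, b) := rfl

theorem brk_of {sep a b : List Char} (hs : sep ≠ [])
    (h : ∀ a₁ a₂, a = a₁ ++ a₂ → a₂ ≠ [] → ¬ sep <+: a₂ ++ sep ++ b) :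
    brk sep (a ++ sep ++ b) = some (a, b) := by
  induction a with
  | nil =>
    cases hsep : sep with
    | nil => exact absurd hsep hs
    | cons c t =>
      rw [← hsep]
      simp only [List.nil_append]
      have hc : sep ++ b = c :: (t ++ b) := by rw [hsep]; simp
      rw [hc, brk_cons, ← hc]
      rw [if_pos (List.isPrefixOf_iff_prefix.mpr ⟨b, rfl⟩)]
      rw [List.drop_left]
  | cons c a' ih =>
    have hnp : ¬ sep.isPrefixOf ((c :: a') ++ sep ++ b) := by
      intro hp
      exact h [] (c :: a') rfl (by simp) (by simpa using List.isPrefixOf_iff_prefix.mp hp)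
    have : (c :: a') ++ sep ++ b = c :: (a' ++ sep ++ b) := by simp
    rw [this, brk_cons, ← this]
    rw [if_neg (by simpa using hnp)]
    rw [ih (fun a₁ a₂ hs hne => h (c :: a₁) a₂ (by simp [hs]) hne)]

theorem brk_b_len {sep l a b : List Char} (hs : sep ≠ []) (h : brk sep l = some (a, b)) :
    b.length < l.length := by
  have hd := brk_decomp h
  subst hd
  have : 1 ≤ sep.length := List.length_pos_iff.mpr hs
  simp
  omega

-- "</think>" cannot straddle the boundary of a "<think>" occurrence
theorem e_no_straddle {a b : List Char} (h : eT <+: a ++ (oT ++ b)) : eT <+: a := by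
  rcases prefix_split h with h1 | ⟨ha, hd⟩
  · exact h1
  · have hlen : a.length ≤ 8 := by simpa [eT] using ha.length_le
    by_cases h8 : a.length = 8
    · have hae : a = eT := ha.eq_of_length (by simp [eT]; omega)
      exact hae ▸ List.prefix_refl _
    · exfalso
      by_cases h0 : a = []
      · subst h0
        simp at hd
        obtain ⟨t, ht⟩ := hd
        have h1 := congrArg (fun l => l[1]?) ht
        simp only at h1
        rw [List.getElem?_append_left (show 1 < eT.length by decide),
            List.getElem?_append_left (show 1 < oT.length by decide)] at h1
        exact absurd h1 (by decide)
      · have hm1 : 1 ≤ a.length := List.length_pos_iff.mpr h0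
        have hm7 : a.length ≤ 7 := by omega
        have hne : eT.drop a.length ≠ [] := by
          intro hnil
          have := congrArg List.length hnil
          simp [eT] at this
          omega
        obtain ⟨t, ht⟩ := hd
        have hh := congrArg (fun l => l[0]?) ht
        simp only at hh
        rw [List.getElem?_append_left (List.length_pos_iff.mpr hne),
            List.getElem?_append_left (show 0 < oT.length by decide)] at hh
        rw [List.getElem?_drop] at hh
        have hh' : eT[a.length]? = some '<' := by
          rw [show a.length + 0 = a.length by omega] at hh
          rw [hh]; decide
        set m := a.length with hm
        interval_cases m <;> exact absurd hh' (by decide)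

-- hctInner finds "</think>" exactly like brk eT on a region free of "<think>"
theorem inner_eq_brk {cs : List Char} (h : ¬ oT <:+: cs) : hctInner cs = brk eT cs := by
  induction cs with
  | nil => rfl
  | cons c rest ih =>
    have hnp : ¬ List.isPrefixOf oT (c :: rest) := fun hp =>
      h (List.IsPrefix.isInfix (List.isPrefixOf_iff_prefix.mp hp))
    have hrest : ¬ oT <:+: rest := fun hi => h (List.infix_cons_iff.mpr (Or.inr hi))
    unfold hctInner
    rw [brk_cons]
    rw [if_neg (by simpa [oT] using hnp)]
    by_cases hp : List.isPrefixOf "</think>".toList (c :: rest)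
    · rw [if_pos hp, if_pos (by simpa [eT] using hp)]
      simp [eT]
    · rw [if_neg hp, if_neg (by simpa [eT] using hp)]
      rw [ih hrest]

theorem inner_none {cs : List Char} (h : ¬ eT <:+: cs) : hctInner cs = none := by
  induction cs with
  | nil => rfl
  | cons c rest ih =>
    have hrest : ¬ eT <:+: rest := fun hi => h (List.infix_cons_iff.mpr (Or.inr hi))
    unfold hctInner
    by_cases hpo : List.isPrefixOf "<think>".toList (c :: rest)
    · rw [if_pos hpo]
    · rw [if_neg hpo]
      rw [if_neg (fun hp => h (List.IsPrefix.isInfix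
        (by simpa [eT] using List.isPrefixOf_iff_prefix.mp hp)))]
      rw [ih hrest]

-- behaviour of hctInner on a region ending at the next "<think>"
theorem inner_spec {a b : List Char} (h : brk oT (a ++ oT ++ b) = some (a, b)) :
    hctInner (a ++ oT ++ b) = (brk eT a).map (fun p => (p.1, p.2 ++ oT ++ b)) := by
  induction a with
  | nil =>
    simp only [List.nil_append]
    cases hob : oT ++ b with
    | nil => exact absurd (congrArg List.length hob) (by simp [oT])
    | cons c t =>
      have hpre : List.isPrefixOf "<think>".toList (c :: t) := by
        rw [← hob]
        simpa [oT] using List.isPrefixOf_iff_prefix.mpr (List.prefix_append oT b)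
      unfold hctInner
      rw [if_pos hpre]
      simp [brk]
  | cons c a' ih =>
    have hl : (c :: a') ++ oT ++ b = c :: (a' ++ oT ++ b) := by simp
    rw [hl] at h ⊢
    rw [brk_cons] at h
    split at h
    · simp at h
    · next hpre =>
      revert h
      split <;> intro h
      · exact absurd h (by simp)
      · next a2 b2 heq =>
        have hpair := Option.some.inj h
        have ha2 : a2 = a' := by
          have := congrArg Prod.fst hpair
          simpa using this
        have hb2 : b2 = b := congrArg Prod.snd hpair
        subst a2
        subst b2
        have hih := ih heq
        unfold hctInner
        rw [if_neg (by simpa [oT] using hpre)]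
        by_cases hep : List.isPrefixOf "</think>".toList (c :: (a' ++ oT ++ b))
        · -- an e-prefix here must lie inside c :: a'
          have hea : eT <+: c :: a' := by
            apply e_no_straddle (a := c :: a') (b := b)
            have h1 := List.isPrefixOf_iff_prefix.mp hep
            simp only [List.append_assoc] at h1
            simp only [List.cons_append, List.append_assoc]
            exact h1
          rw [if_pos hep]
          rw [brk_cons, if_pos (List.isPrefixOf_iff_prefix.mpr hea)]
          have hlen : 8 ≤ (c :: a').length := by
            simpa [eT] using hea.length_le
          simp only [Option.map_some]
          congr 1
          rw [show eT.length = 8 by decide]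
          have hsplit2 : (c :: (a' ++ oT ++ b)) = (c :: a') ++ (oT ++ b) := by simp
          rw [hsplit2, List.drop_append_of_le_length hlen]
          simp
        · rw [if_neg hep]
          have hnea : ¬ eT <+: c :: a' := by
            intro hpp
            have h2 : eT <+: (c :: a') ++ (oT ++ b) := hpp.trans (List.prefix_append _ _)
            simp only [List.cons_append] at h2
            exact hep (List.isPrefixOf_iff_prefix.mpr
              (by simp only [List.append_assoc]; exact h2))
          rw [brk_cons, if_neg (fun hpp => hnea (List.isPrefixOf_iff_prefix.mp hpp))]
          rw [hih]
          cases brk eT a' with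
          | none => rfl
          | some q => rfl

-- unfolding equations for hctScan
def scanOpen (body : List Char) : List Char :=
  match hctInner body with
  | some (buf, rem) => cyanT ++ oT ++ buf ++ eT ++ resetT ++ hctScan rem
  | none => oT ++ hctScan body

theorem hctScan_nil : hctScan [] = [] := by
  simp [hctScan]

theorem hctScan_cons_open {c : Char} {rest : List Char}
    (h : List.isPrefixOf oT (c :: rest)) :
    hctScan (c :: rest) = scanOpen ((c :: rest).drop 7) := by
  rw [hctScan]
  rw [if_pos (by simpa [oT] using h)]
  unfold scanOpen
  cases hi : hctInner ((c :: rest).drop 7) with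
  | none => simp [hi, oT]
  | some p => cases p with
    | mk buf rem => simp [hi, oT, eT, cyanT, resetT]

theorem hctScan_cons_not_open {c : Char} {rest : List Char}
    (h : ¬ List.isPrefixOf oT (c :: rest)) :
    hctScan (c :: rest) = c :: hctScan rest := by
  rw [hctScan]
  rw [if_neg (by simpa [oT] using h)]

theorem scan_of_no_open {cs : List Char} (h : ¬ oT <:+: cs) : hctScan cs = cs := by
  induction cs with
  | nil => exact hctScan_nil
  | cons c rest ih =>
    have hrest : ¬ oT <:+: rest := fun hi => h (List.infix_cons_iff.mpr (Or.inr hi))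
    rw [hctScan_cons_not_open (fun hp =>
      h (List.IsPrefix.isInfix (List.isPrefixOf_iff_prefix.mp hp)))]
    rw [ih hrest]

theorem scan_of_no_e (cs : List Char) (h : ¬ eT <:+: cs) : hctScan cs = cs := by
  have H : ∀ n cs, cs.length ≤ n → ¬ eT <:+: cs → hctScan cs = cs := by
    intro n
    induction n with
    | zero =>
      intro cs hlen _
      have hnil : cs = [] := List.eq_nil_of_length_eq_zero (by omega)
      subst hnil
      exact hctScan_nil
    | succ n ihn =>
      intro cs hlen hcs
      cases cs with
      | nil => exact hctScan_nil
      | cons c rest =>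
        by_cases hpo : List.isPrefixOf oT (c :: rest)
        · rw [hctScan_cons_open hpo]
          obtain ⟨t, ht⟩ := List.isPrefixOf_iff_prefix.mp hpo
          have hdrop : (c :: rest).drop 7 = t := by
            rw [← ht, show (7 : Nat) = oT.length by decide, List.drop_left]
          have hnt : ¬ eT <:+: t := fun hi => hcs (by
            rw [← ht]; exact hi.trans (List.suffix_append oT t).isInfix)
          unfold scanOpen
          rw [hdrop, inner_none hnt]
          rw [ihn t (by have := congrArg List.length ht; simp [oT] at this; simp at hlen; omega) hnt]
          rw [← ht]
        · rw [hctScan_cons_not_open hpo]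
          have hrest : ¬ eT <:+: rest := fun hi => hcs (List.infix_cons_iff.mpr (Or.inr hi))
          rw [ihn rest (by simp at hlen; omega) hrest]
  exact H cs.length cs le_rfl h

theorem scan_brk {l p body : List Char} (h : brk oT l = some (p, body)) :
    hctScan l = p ++ scanOpen body := by
  induction l generalizing p body with
  | nil => simp [brk] at h
  | cons c rest ih =>
    rw [brk_cons] at h
    split at h
    · next hpre =>
      simp at h
      obtain ⟨rfl, rfl⟩ := h
      rw [hctScan_cons_open (by simpa [oT] using hpre)]
      rw [show oT.length = 7 by decide]
      simp
    · next hpre =>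
      revert h
      split <;> intro h
      · exact absurd h (by simp)
      · next a' b' heq =>
        simp at h
        obtain ⟨rfl, rfl⟩ := h
        rw [hctScan_cons_not_open (by simpa [oT] using hpre)]
        rw [ih heq]
        simp

-- fueled reference version of Python's str.split
def parts (sep : List Char) : Nat → List Char → List (List Char)
  | 0, l => [l]
  | fuel + 1, l =>
    match brk sep l with
    | none => [l]
    | some (a, b) => a :: parts sep fuel b

theorem parts_ne_nil (sep : List Char) (fuel : Nat) (l : List Char) :
    parts sep fuel l ≠ [] := by
  cases fuel with
  | zero => simp [parts]
  | succ n =>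
    unfold parts
    cases brk sep l <;> simp

theorem parts_of_brk_none {sep l : List Char} (h : brk sep l = none) (fuel : Nat) :
    parts sep fuel l = [l] := by
  cases fuel with
  | zero => rfl
  | succ n => simp [parts, h]

theorem parts_succ (sep : List Char) (fuel : Nat) (l : List Char) :
    parts sep (fuel + 1) l =
      match brk sep l with
      | none => [l]
      | some (a, b) => a :: parts sep fuel b := rfl

theorem parts_fuel {sep : List Char} (hs : sep ≠ []) :
    ∀ fuel fuel' l, l.length ≤ fuel → l.length ≤ fuel' →
      parts sep fuel l = parts sep fuel' l := by
  intro fuel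
  induction fuel with
  | zero =>
    intro fuel' l hl _
    have : l = [] := List.eq_nil_of_length_eq_zero (by omega)
    subst this
    have hb : brk sep ([] : List Char) = none := rfl
    rw [parts_of_brk_none hb, parts_of_brk_none hb]
  | succ n ih =>
    intro fuel' l hl hl'
    cases hb : brk sep l with
    | none => rw [parts_of_brk_none hb, parts_of_brk_none hb]
    | some p =>
      cases p with
      | mk a b =>
        have hblen : b.length < l.length := brk_b_len hs hb
        cases fuel' with
        | zero =>
          have : l = [] := List.eq_nil_of_length_eq_zero (by omega)
          subst this
          simp [brk] at hb
        | succ n' =>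
          rw [parts_succ, parts_succ, hb]
          simp only []
          rw [ih n' b (by omega) (by omega)]

theorem splitOn_go_parts {sep : List Char} (hs : sep ≠ []) :
    ∀ fuel l cur acc, l.length ≤ fuel →
      PySem.Chars.splitOn.go sep fuel l cur acc =
        acc.reverse ++
          (match parts sep fuel l with
           | [] => []
           | h :: t => (cur.reverse ++ h) :: t) := by
  intro fuel
  induction fuel with
  | zero =>
    intro l cur acc hl
    rw [PySem.Chars.splitOn.go]
    simp [parts]
  | succ n ih =>
    intro l cur acc hl
    cases l with
    | nil =>
      rw [PySem.Chars.splitOn.go]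
      · have hb : brk sep ([] : List Char) = none := rfl
        rw [parts_of_brk_none hb]
        simp
      · omega
    | cons c rest =>
      rw [PySem.Chars.splitOn.go]
      by_cases hp : sep.isPrefixOf (c :: rest)
      · rw [if_pos hp]
        have hdlen : (List.drop sep.length (c :: rest)).length ≤ n := by
          have hs1 : 1 ≤ sep.length := List.length_pos_iff.mpr hs
          simp at hl ⊢
          omega
        rw [ih _ [] (cur.reverse :: acc) hdlen]
        have hbrk : brk sep (c :: rest) = some ([], List.drop sep.length (c :: rest)) := by
          rw [brk_cons, if_pos hp]
        rw [parts_succ, hbrk]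
        simp only []
        cases hpp : parts sep n (List.drop sep.length (c :: rest)) with
        | nil => exact absurd hpp (parts_ne_nil _ _ _)
        | cons ph pt => simp
      · rw [if_neg hp]
        rw [ih rest (c :: cur) acc (by simp at hl; omega)]
        rw [parts_succ, brk_cons, if_neg hp]
        cases hbr : brk sep rest with
        | none =>
          rw [parts_of_brk_none hbr]
          simp
        | some p =>
          cases p with
          | mk a b =>
            cases n with
            | zero =>
              have hl2 := hl
              rw [List.length_cons] at hl2
              have : rest = [] := List.eq_nil_of_length_eq_zero (by omega)
              subst this
              simp [brk] at hbr
            | succ n2 =>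
              rw [parts_succ, hbr]
              simp only []
              have hblen : b.length < rest.length := brk_b_len hs hbr
              rw [parts_fuel hs n2 (n2 + 1) b (by simp at hl; omega) (by simp at hl; omega)]
              simp

theorem splitOn_parts {sep : List Char} (hs : sep ≠ []) (l : List Char) :
    PySem.Chars.splitOn l sep = parts sep (l.length + 1) l := by
  unfold PySem.Chars.splitOn
  rw [splitOn_go_parts hs (l.length + 1) l [] [] (by omega)]
  cases hpp : parts sep (l.length + 1) l with
  | nil => exact absurd hpp (parts_ne_nil _ _ _)
  | cons ph pt => simp

theorem splitOnMax_go_zero (sep : List Char) :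
    ∀ fuel l cur acc, PySem.Chars.splitOnMax.go sep fuel 0 l cur acc =
      acc.reverse ++ [cur.reverse ++ l] := by
  intro fuel l cur acc
  cases fuel with
  | zero =>
    rw [PySem.Chars.splitOnMax.go.eq_def]
    simp
  | succ n =>
    cases l with
    | nil =>
      rw [PySem.Chars.splitOnMax.go.eq_def]
      simp
    | cons c rest =>
      rw [PySem.Chars.splitOnMax.go.eq_def]
      simp

theorem splitOnMax_go_one (sep : List Char) :
    ∀ l fuel cur acc, l.length ≤ fuel →
      PySem.Chars.splitOnMax.go sep fuel 1 l cur acc =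
        match brk sep l with
        | none => acc.reverse ++ [cur.reverse ++ l]
        | some (a, b) => acc.reverse ++ [cur.reverse ++ a, b] := by
  intro l
  induction l with
  | nil =>
    intro fuel cur acc _
    cases fuel with
    | zero =>
      rw [PySem.Chars.splitOnMax.go.eq_def]
      simp [brk]
    | succ n =>
      rw [PySem.Chars.splitOnMax.go.eq_def]
      simp [brk]
  | cons c rest ih =>
    intro fuel cur acc hl
    cases fuel with
    | zero => simp at hl
    | succ n =>
      rw [PySem.Chars.splitOnMax.go.eq_def]
      simp only [Nat.succ_ne_zero, reduceIte]
      by_cases hp : sep.isPrefixOf (c :: rest)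
      · rw [if_pos hp]
        rw [brk_cons, if_pos hp]
        rw [splitOnMax_go_zero]
        simp
      · rw [if_neg hp]
        rw [ih n (c :: cur) acc (by simp at hl; omega)]
        rw [brk_cons, if_neg hp]
        cases hbr : brk sep rest with
        | none => simp
        | some p =>
          cases p with
          | mk a b => simp

theorem splitOnMax_one_brk {sep : List Char} (hs : sep ≠ []) (l : List Char) :
    PySem.Chars.splitOnMax l sep 1 =
      match brk sep l with
      | none => [l]
      | some (a, b) => [a, b] := by
  unfold PySem.Chars.splitOnMax
  rw [if_neg (by omega)]
  rw [show ((1 : Int)).toNat = 1 from rfl]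
  rw [splitOnMax_go_one sep l (l.length + 1) [] [] (by omega)]
  cases hbr : brk sep l with
  | none => simp
  | some p =>
    cases p with
    | mk a b => simp

-- the list-level image of A's per-part function
def gpart (part : List Char) : List Char :=
  if PySem.Chars.isIn eT part then
    match PySem.Chars.splitOnMax part eT 1 with
    | tc :: r :: _ => cyanT ++ oT ++ tc ++ eT ++ resetT ++ r
    | _ => part
  else oT ++ part

theorem join_nil_cons (x : List Char) (ys : List (List Char)) :
    PySem.Chars.join [] (x :: ys) = x ++ PySem.Chars.join [] ys := by
  cases ys with
  | nil => simp [PySem.Chars.join_singleton, PySem.Chars.join_nil]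
  | cons y t => rw [PySem.Chars.join_cons_cons]; simp

theorem scanOpen_some {body buf rem : List Char} (h : hctInner body = some (buf, rem)) :
    scanOpen body = cyanT ++ oT ++ buf ++ eT ++ resetT ++ hctScan rem := by
  unfold scanOpen
  rw [h]

theorem scanOpen_none {body : List Char} (h : hctInner body = none) :
    scanOpen body = oT ++ hctScan body := by
  unfold scanOpen
  rw [h]

theorem scanOpen_join (body : List Char) :
    scanOpen body = PySem.Chars.join [] ((parts oT (body.length + 1) body).map gpart) := by
  have H : ∀ n body, body.length ≤ n →
      scanOpen body = PySem.Chars.join [] ((parts oT (body.length + 1) body).map gpart) := by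
    intro n
    induction n with
    | zero =>
      intro body hlen
      have hnil : body = [] := List.eq_nil_of_length_eq_zero (by omega)
      subst hnil
      have hb : brk oT ([] : List Char) = none := rfl
      have he : brk eT ([] : List Char) = none := rfl
      rw [parts_of_brk_none hb]
      rw [scanOpen_none rfl]
      rw [hctScan_nil]
      have hfalse : PySem.Chars.isIn eT ([] : List Char) = false :=
        (PySem.Chars.isIn_eq_false_iff _ _).mpr ((brk_none_iff (by decide) _).mp he)
      simp only [List.map_cons, List.map_nil, PySem.Chars.join_singleton]
      unfold gpart
      rw [hfalse]
      simp
    | succ n ihn =>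
      intro body hlen
      cases hb : brk oT body with
      | none =>
        have hno : ¬ oT <:+: body := (brk_none_iff (by decide) body).mp hb
        rw [parts_of_brk_none hb]
        have hinner : hctInner body = brk eT body := inner_eq_brk hno
        cases he : brk eT body with
        | none =>
          rw [scanOpen_none (by rw [hinner, he])]
          rw [scan_of_no_open hno]
          have hfalse : PySem.Chars.isIn eT body = false :=
            (PySem.Chars.isIn_eq_false_iff _ _).mpr ((brk_none_iff (by decide) _).mp he)
          simp only [List.map_cons, List.map_nil, PySem.Chars.join_singleton]
          unfold gpart
          rw [hfalse]
          simp
        | some p =>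
          cases p with
          | mk tc r =>
            have hdec := brk_decomp he
            rw [scanOpen_some (by rw [hinner, he])]
            have hnor : ¬ oT <:+: r := fun hi => hno (by
              rw [hdec]
              exact hi.trans (List.suffix_append (tc ++ eT) r).isInfix)
            rw [scan_of_no_open hnor]
            have htrue : PySem.Chars.isIn eT body = true :=
              (PySem.Chars.isIn_iff_infix _ _).mpr ⟨tc, r, hdec.symm⟩
            simp only [List.map_cons, List.map_nil, PySem.Chars.join_singleton]
            unfold gpart
            rw [htrue]
            rw [splitOnMax_one_brk (by decide) body, he]
            simp
      | some p =>
        cases p with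
        | mk a b =>
          have hdec := brk_decomp hb
          have hblen : b.length < body.length := brk_b_len (by decide) hb
          have hrhs : PySem.Chars.join [] ((parts oT (body.length + 1) body).map gpart) =
              gpart a ++ PySem.Chars.join [] ((parts oT (b.length + 1) b).map gpart) := by
            rw [parts_succ, hb]
            simp only []
            rw [parts_fuel (show oT ≠ [] by decide) body.length (b.length + 1) b
              (by omega) (by omega)]
            rw [List.map_cons, join_nil_cons]
          rw [hrhs, ← ihn b (by omega)]
          have hb' : brk oT (a ++ oT ++ b) = some (a, b) := by rw [← hdec]; exact hb
          have hinner : hctInner body = (brk eT a).map (fun p => (p.1, p.2 ++ oT ++ b)) := by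
            rw [hdec]
            exact inner_spec hb'
          cases hea : brk eT a with
          | none =>
            rw [scanOpen_none (by rw [hinner, hea]; rfl)]
            rw [scan_brk hb]
            have hfalse : PySem.Chars.isIn eT a = false :=
              (PySem.Chars.isIn_eq_false_iff _ _).mpr ((brk_none_iff (by decide) _).mp hea)
            unfold gpart
            rw [hfalse]
            simp
          | some q =>
            cases q with
            | mk tc r =>
              have hdeca := brk_decomp hea
              rw [scanOpen_some (by rw [hinner, hea]; rfl)]
              have hbrkr : brk oT (r ++ oT ++ b) = some (r, b) := by
                apply brk_of (show oT ≠ [] by decide)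
                intro x y hxy hy
                apply brk_no_occ hb (tc ++ eT ++ x) y
                · rw [hdeca, hxy]
                  simp [List.append_assoc]
                · exact hy
              rw [scan_brk hbrkr]
              have htrue : PySem.Chars.isIn eT a = true :=
                (PySem.Chars.isIn_iff_infix _ _).mpr ⟨tc, r, hdeca.symm⟩
              unfold gpart
              rw [htrue]
              rw [splitOnMax_one_brk (by decide) a, hea]
              simp [List.append_assoc]
  exact H body.length body le_rfl

-- the list-level main theorem
theorem hctScan_eq_athink (l : List Char) :
    hctScan l =
      (if PySem.Chars.isIn oT l && PySem.Chars.isIn eT l then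
        match PySem.Chars.splitOn l oT with
        | p0 :: rest => PySem.Chars.join [] (p0 :: rest.map gpart)
        | [] => l
      else l) := by
  by_cases ho : PySem.Chars.isIn oT l = true
  · by_cases he : PySem.Chars.isIn eT l = true
    · rw [ho, he]
      simp only [Bool.and_self, if_true]
      cases hb : brk oT l with
      | none =>
        have hof : PySem.Chars.isIn oT l = false :=
          (PySem.Chars.isIn_eq_false_iff _ _).mpr ((brk_none_iff (by decide) l).mp hb)
        rw [hof] at ho
        exact absurd ho (by simp)
      | some p =>
        cases p with
        | mk p0 body =>
          rw [splitOn_parts (by decide) l]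
          rw [parts_succ, hb]
          simp only []
          have hblen : body.length < l.length := brk_b_len (by decide) hb
          rw [parts_fuel (show oT ≠ [] by decide) l.length (body.length + 1) body
            (by omega) (by omega)]
          rw [join_nil_cons]
          rw [← scanOpen_join body]
          exact scan_brk hb
    · have hef : PySem.Chars.isIn eT l = false := by
        cases hh : PySem.Chars.isIn eT l
        · rfl
        · exact absurd hh he
      rw [ho, hef]
      simp only [Bool.and_false]
      exact scan_of_no_e l ((PySem.Chars.isIn_eq_false_iff _ _).mp hef)
  · have hof : PySem.Chars.isIn oT l = false := by
      cases hh : PySem.Chars.isIn oT l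
      · rfl
      · exact absurd hh ho
    rw [hof]
    simp only [Bool.false_and]
    exact scan_of_no_open ((PySem.Chars.isIn_eq_false_iff _ _).mp hof)


-- ===== VERDICT (by name: the statement is the Claim_ definition above) =====
set_option maxHeartbeats 1000000 in
theorem highlight_confidence_token_spec : Claim_equal_highlight_confidence_token := by
  intro text _
  show highlight_confidence_token text = highlight_confidence_token_alt text
  unfold highlight_confidence_token highlight_confidence_token_alt
  dsimp only
  generalize PySem.Str.replace (PySem.Str.replace text "<confident>" ("\x1b[1m" ++ "\x1b[92m" ++ "<confident>" ++ "\x1b[0m")) "<uncertain>" ("\x1b[1m" ++ "\x1b[93m" ++ "<uncertain>" ++ "\x1b[0m") = t2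
  refine String.toList_inj.mp ?_
  rw [String.toList_ofList]
  rw [hctScan_eq_athink]
  have e1 : PySem.Str.isIn "<think>" t2 = PySem.Chars.isIn oT t2.toList :=
    PySem.Str.isIn_eq _ _
  have e2 : PySem.Str.isIn "</think>" t2 = PySem.Chars.isIn eT t2.toList :=
    PySem.Str.isIn_eq _ _
  rw [e1, e2]
  by_cases hcond : (PySem.Chars.isIn oT t2.toList && PySem.Chars.isIn eT t2.toList) = true
  · rw [if_pos hcond, if_pos hcond]
    have hsp : PySem.Str.split? t2 "<think>" =
        some (List.map String.ofList (PySem.Chars.splitOn t2.toList oT)) := by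
      simp [PySem.Str.split?, PySem.Chars.split?, oT]
    rw [hsp]
    cases hlist : PySem.Chars.splitOn t2.toList oT with
    | nil =>
      rw [splitOn_parts (show oT ≠ [] by decide)] at hlist
      exact absurd hlist (parts_ne_nil _ _ _)
    | cons p0 rest =>
      simp only [List.map_cons]
      unfold PySem.Str.join
      rw [String.toList_ofList]
      rw [show ("" : String).toList = [] from rfl]
      simp only [List.map_cons, List.map_map, String.toList_ofList]
      congr 1
      congr 1
      refine List.map_congr_left (fun part _ => ?_)
      dsimp only [Function.comp]
      have hIs : PySem.Str.isIn "</think>" (String.ofList part) = PySem.Chars.isIn eT part := by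
        rw [PySem.Str.isIn_eq]
        simp [eT]
      have hsm : PySem.Str.splitMax? (String.ofList part) "</think>" 1 =
          some (List.map String.ofList (PySem.Chars.splitOnMax part eT 1)) := by
        simp [PySem.Str.splitMax?, PySem.Chars.splitMax?, eT]
      unfold gpart
      by_cases hc : PySem.Chars.isIn eT part = true
      · rw [hIs, hc]
        simp only [if_true]
        rw [hsm]
        cases hl : PySem.Chars.splitOnMax part eT 1 with
        | nil => simp
        | cons x t =>
          cases t with
          | nil => simp
          | cons y t3 => simp [cyanT, oT, eT, resetT]
      · have hcf : PySem.Chars.isIn eT part = false := by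
          cases hh : PySem.Chars.isIn eT part
          · rfl
          · exact absurd hh hc
        rw [hIs, hcf]
        simp [oT]
  · rw [if_neg hcond, if_neg hcond]
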